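-- pv_equiv track=rewrite | github.com/Octoping925/BOJ_PS | 01000/# F번 blobfearful.py | subdict
-- ===== SOURCE A (Python) =====
-- import copy
--
-- def subdict(x, y):
--     tmp = copy.deepcopy(x)
--     for i in y:
--         if i in tmp:
--             tmp[i] = max(tmp[i] - y[i], 0)
--             if tmp[i] == 0:
--                 del tmp[i]
--     return tmp
-- ===== SOURCE B (Python) =====
-- def subdict(x, y):
--     res = {}
--     for k, v in x.items():
--         if k in y:
--             nv = max(v - y[k], 0)
--             if nv != 0:
--                 res[k] = nv
--         else:
--             res[k] = v
--     return res
-- ===== Notes on version B (the rewrite author's own statement) =====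
-- stated objective: idiomatic
-- what changed: B builds a fresh result dict in a single pass over x (clamping and zero-dropping only the keys that appear in y), instead of A's deepcopy of x followed by mutation and deletion while iterating over y.
import Mathlib
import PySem

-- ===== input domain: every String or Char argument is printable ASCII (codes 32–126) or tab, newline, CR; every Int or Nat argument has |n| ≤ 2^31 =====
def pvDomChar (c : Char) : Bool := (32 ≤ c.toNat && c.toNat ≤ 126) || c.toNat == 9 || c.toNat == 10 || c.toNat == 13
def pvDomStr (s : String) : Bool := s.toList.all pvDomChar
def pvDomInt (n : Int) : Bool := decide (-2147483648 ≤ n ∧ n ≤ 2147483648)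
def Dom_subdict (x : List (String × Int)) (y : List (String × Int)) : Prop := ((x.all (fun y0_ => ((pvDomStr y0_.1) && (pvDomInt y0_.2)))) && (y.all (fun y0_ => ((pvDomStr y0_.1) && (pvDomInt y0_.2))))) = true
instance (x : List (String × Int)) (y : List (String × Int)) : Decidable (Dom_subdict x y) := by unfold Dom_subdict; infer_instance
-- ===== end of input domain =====

-- B builds a fresh result dict in one pass over x instead of deep-copying x and
-- mutating/deleting entries while iterating over y (objective: idiomatic).

-- dict helpers shared by both ports (assoc-list semantics: first match)
def pvContains (d : List (String × Int)) (k : String) : Bool := d.any (fun p => p.1 == k)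

def pvGetD (d : List (String × Int)) (k : String) : Int :=
  match d with
  | [] => 0
  | p :: rest => if p.1 == k then p.2 else pvGetD rest k

-- d[k] = v on a dict: overwrite in place if the key exists, else append
def pvSet (d : List (String × Int)) (k : String) (v : Int) : List (String × Int) :=
  if pvContains d k then d.map (fun p => if p.1 == k then (p.1, v) else p) else d ++ [(k, v)]

-- ===== PORT A =====
-- one body of A's 'for i in y' loop: tmp[i] = max(tmp[i]-y[i],0); if tmp[i]==0: del tmp[i]
def pvStepA (y : List (String × Int)) (tmp : List (String × Int)) (i : String × Int) : List (String × Int) :=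
  if pvContains tmp i.1 then
    let nv := max (pvGetD tmp i.1 - pvGetD y i.1) 0
    if nv == 0 then tmp.eraseP (fun p => p.1 == i.1)
    else tmp.map (fun p => if p.1 == i.1 then (p.1, nv) else p)
  else tmp

def subdict (x : List (String × Int)) (y : List (String × Int)) : List (String × Int) :=
  y.foldl (pvStepA y) x

-- ===== PORT B =====
def subdict_alt (x : List (String × Int)) (y : List (String × Int)) : List (String × Int) :=
  x.foldl (fun res p =>
    if pvContains y p.1 then
      let nv := max (p.2 - pvGetD y p.1) 0
      if nv != 0 then pvSet res p.1 nv else res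
    else pvSet res p.1 p.2) []

-- ===== PRECONDITION & SPEC =====
-- Pre_: the association lists encode Python dicts, whose keys are unique; on lists with
-- duplicate keys (which no dict produces) the encoding is meaningless, so they are excluded.
def Pre_subdict (x : List (String × Int)) (y : List (String × Int)) : Prop :=
  (x.map Prod.fst).Nodup ∧ (y.map Prod.fst).Nodup
instance (x : List (String × Int)) (y : List (String × Int)) : Decidable (Pre_subdict x y) := by
  unfold Pre_subdict; infer_instance

def pvWitness_subdict : (List (String × Int)) × (List (String × Int)) :=
  ([("a", 3), ("b", 1), ("c", 0)], [("a", 1), ("b", 5), ("d", 2)])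

def Spec_subdict (x : List (String × Int)) (y : List (String × Int)) (out : List (String × Int)) : Prop := out = subdict_alt x y
instance (x : List (String × Int)) (y : List (String × Int)) (out : List (String × Int)) : Decidable (Spec_subdict x y out) := by unfold Spec_subdict; infer_instance

-- ===== CLAIM (what is proved, stated in full; the proofs are below) =====
def Claim_equal_subdict : Prop := ∀ (x : List (String × Int)) (y : List (String × Int)), Dom_subdict x y → Pre_subdict x y → Spec_subdict x y (subdict x y)

-- ===== LEMMAS AND PROOFS =====

-- the common specification: per-entry transformation of x driven by lookups in y
def pvF (y : List (String × Int)) (p : String × Int) : Option (String × Int) :=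
  if pvContains y p.1 then
    let nv := max (p.2 - pvGetD y p.1) 0
    if nv = 0 then none else some (p.1, nv)
  else some p

theorem pvContains_iff (d : List (String × Int)) (k : String) :
    pvContains d k = true ↔ k ∈ d.map Prod.fst := by
  simp [pvContains, List.any_eq_true, beq_iff_eq, List.mem_map]

theorem pvContains_append_single (d : List (String × Int)) (k k' : String) (v : Int) :
    pvContains (d ++ [(k, v)]) k' = (pvContains d k' || (k == k')) := by
  simp [pvContains, List.any_append]

theorem pvGetD_of_mem (y : List (String × Int)) (k : String) (w : Int)
    (hm : (k, w) ∈ y) (hnd : (y.map Prod.fst).Nodup) : pvGetD y k = w := by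
  induction y with
  | nil => cases hm
  | cons p rest ih =>
    simp only [List.map_cons, List.nodup_cons] at hnd
    rcases List.mem_cons.1 hm with h | h
    · cases h; simp [pvGetD]
    · have hk : p.1 ≠ k := by
        intro he; exact hnd.1 (he ▸ (List.mem_map.2 ⟨(k, w), h, rfl⟩))
      simp [pvGetD, hk, ih h hnd.2]

theorem pvF_cons_ne (k : String) (w : Int) (ys : List (String × Int)) (p : String × Int)
    (h : p.1 ≠ k) : pvF ((k, w) :: ys) p = pvF ys p := by
  have hb : (k == p.1) = false := by simp [Ne.symm h]
  simp only [pvF, pvContains, pvGetD, List.any_cons, hb, Bool.false_or, Bool.false_eq_true,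
    if_false]

theorem stepA'_cons (k : String) (w : Int) (p : String × Int) (rest : List (String × Int))
    (h : p.1 ≠ k) :
    pvStepA [(k, w)] (p :: rest) (k, w) = p :: pvStepA [(k, w)] rest (k, w) := by
  simp only [pvStepA, pvContains, List.any_cons, pvGetD]
  have hb : (p.1 == k) = false := by simp [h]
  simp only [hb, Bool.false_or, if_false]
  by_cases hc : rest.any (fun q => q.1 == k) = true
  · simp only [hc, if_true]
    by_cases hz : max (pvGetD rest k - w) 0 == 0
    · simp [hz, hb]
    · simp [hz, h]
  · simp [Bool.not_eq_true] at hc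
    simp [hc]

-- collapsing the step: pvStepA y tmp i only consults y through pvGetD y i.1
theorem stepA_eq (y : List (String × Int)) (tmp : List (String × Int)) (i : String × Int)
    (hw : pvGetD y i.1 = i.2) : pvStepA y tmp i = pvStepA [i] tmp i := by
  simp [pvStepA, pvGetD, hw]

theorem keys_stepA (y : List (String × Int)) (tmp : List (String × Int)) (i : String × Int)
    (hnd : (tmp.map Prod.fst).Nodup) : ((pvStepA y tmp i).map Prod.fst).Nodup := by
  have hmap : (tmp.map (fun p => if p.1 == i.1 then (p.1, max (pvGetD tmp i.1 - pvGetD y i.1) 0) else p)).map Prod.fst = tmp.map Prod.fst := by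
    simp only [List.map_map]
    apply List.map_congr_left
    intro p _
    simp only [Function.comp_apply]
    split <;> rfl
  unfold pvStepA
  by_cases hc : pvContains tmp i.1 = true
  · simp only [hc, if_true]
    by_cases hz : (max (pvGetD tmp i.1 - pvGetD y i.1) 0 == 0) = true
    · simp only [hz, if_true]
      exact ((tmp.eraseP_sublist).map Prod.fst).nodup hnd
    · have hz' : (max (pvGetD tmp i.1 - pvGetD y i.1) 0 == 0) = false := by
        simpa using hz
      simp only [hz', Bool.false_eq_true, if_false]
      rw [hmap]; exact hnd
  · have hc' : pvContains tmp i.1 = false := by simpa using hc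
    simp only [hc', Bool.false_eq_true, if_false]
    exact hnd

-- core A-lemma, inner induction: one step then pvF ys  =  pvF ((k,w)::ys) directly
theorem stepA_filterMap (k : String) (w : Int) (ys : List (String × Int))
    (hk : k ∉ ys.map Prod.fst) :
    ∀ tmp : List (String × Int), (tmp.map Prod.fst).Nodup →
      (pvStepA [(k, w)] tmp (k, w)).filterMap (pvF ys) = tmp.filterMap (pvF ((k, w) :: ys)) := by
  intro tmp
  induction tmp with
  | nil => intro _; simp [pvStepA, pvContains]
  | cons p rest ih =>
    intro hnd
    obtain ⟨p1, p2⟩ := p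
    simp only [List.map_cons, List.nodup_cons] at hnd
    by_cases hp : p1 = k
    · subst hp
      -- head entry is the matched key; rest contains no p1
      have hrk : p1 ∉ rest.map Prod.fst := hnd.1
      have hcong : ∀ q ∈ rest, pvF ((p1, w) :: ys) q = pvF ys q := by
        intro q hq
        exact pvF_cons_ne _ _ _ _ (fun he => hrk (he ▸ (List.mem_map.2 ⟨q, hq, rfl⟩)))
      have hrest : rest.filterMap (pvF ((p1, w) :: ys)) = rest.filterMap (pvF ys) :=
        List.filterMap_congr hcong
      have hmapid : rest.map (fun q => if q.1 == p1 then (q.1, max (p2 - w) 0) else q) = rest := by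
        apply List.map_congr_left (g := id) (h := ?_) |>.trans (List.map_id rest)
        intro q hq
        have : (q.1 == p1) = false := by
          simp only [beq_eq_false_iff_ne, ne_eq]
          intro he; exact hrk (he ▸ (List.mem_map.2 ⟨q, hq, rfl⟩))
        simp [this]
      have hcz : pvContains ys p1 = false := by
        cases h : pvContains ys p1
        · rfl
        · exact absurd ((pvContains_iff ys p1).1 h) hk
      have hstep : pvStepA [(p1, w)] ((p1, p2) :: rest) (p1, w) =
          (if max (p2 - w) 0 == 0 then rest
           else (p1, max (p2 - w) 0) :: rest.map (fun q => if q.1 == p1 then (q.1, max (p2 - w) 0) else q)) := by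
        simp [pvStepA, pvContains, pvGetD]
      by_cases hz : max (p2 - w) 0 = 0
      · rw [hstep]
        have hzb : (max (p2 - w) 0 == 0) = true := by simp [hz]
        rw [hzb, if_pos rfl]
        have hfp : pvF ((p1, w) :: ys) (p1, p2) = none := by
          simp [pvF, pvContains, pvGetD, hz]
        simp [hfp, hrest]
      · rw [hstep]
        have hzb : (max (p2 - w) 0 == 0) = false := by simp [hz]
        rw [hzb]
        simp only [Bool.false_eq_true, if_false, hmapid, List.filterMap_cons]
        have hfp1 : pvF ys (p1, max (p2 - w) 0) = some (p1, max (p2 - w) 0) := by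
          simp [pvF, hcz]
        have hfp2 : pvF ((p1, w) :: ys) (p1, p2) = some (p1, max (p2 - w) 0) := by
          simp [pvF, pvContains, pvGetD, hz]
        rw [hfp1, hfp2, hrest]
    · -- head entry untouched by this step
      have hstep := stepA'_cons k w (p1, p2) rest hp
      rw [hstep]
      simp only [List.filterMap_cons]
      rw [ih hnd.2, pvF_cons_ne k w ys (p1, p2) hp]

theorem foldA_eq (ys : List (String × Int)) :
    ∀ tmp : List (String × Int), (ys.map Prod.fst).Nodup → (tmp.map Prod.fst).Nodup →
      ys.foldl (fun t i => pvStepA [i] t i) tmp = tmp.filterMap (pvF ys) := by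
  induction ys with
  | nil =>
    intro tmp _ _
    simp [pvF, pvContains]
  | cons i ys ih =>
    intro tmp hy htmp
    obtain ⟨k, w⟩ := i
    simp only [List.map_cons, List.nodup_cons] at hy
    rw [List.foldl_cons]
    rw [ih _ hy.2 (keys_stepA _ _ _ htmp)]
    exact stepA_filterMap k w ys hy.1 tmp htmp

theorem subdict_eq_filterMap (x y : List (String × Int))
    (hx : (x.map Prod.fst).Nodup) (hy : (y.map Prod.fst).Nodup) :
    subdict x y = x.filterMap (pvF y) := by
  unfold subdict
  have hcg : y.foldl (pvStepA y) x = y.foldl (fun t i => pvStepA [i] t i) x := by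
    apply PySem.List.foldl_congr_mem
    intro acc i hi
    exact stepA_eq y acc i (pvGetD_of_mem y i.1 i.2 (by simpa using hi) hy)
  rw [hcg]
  exact foldA_eq y x hy hx

theorem subdict_alt_eq_filterMap (y : List (String × Int)) :
    ∀ (x acc : List (String × Int)), (x.map Prod.fst).Nodup →
      (∀ p ∈ x, pvContains acc p.1 = false) →
      x.foldl (fun res p =>
        if pvContains y p.1 then
          let nv := max (p.2 - pvGetD y p.1) 0
          if nv != 0 then pvSet res p.1 nv else res
        else pvSet res p.1 p.2) acc = acc ++ x.filterMap (pvF y) := by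
  intro x
  induction x with
  | nil => intro acc _ _; simp
  | cons p rest ih =>
    intro acc hx hacc
    obtain ⟨p1, p2⟩ := p
    simp only [List.map_cons, List.nodup_cons] at hx
    have hacc1 : pvContains acc p1 = false := hacc (p1, p2) List.mem_cons_self
    have hset : ∀ v : Int, pvSet acc p1 v = acc ++ [(p1, v)] := by
      intro v; simp [pvSet, hacc1]
    have hacc' : ∀ v : Int, ∀ q ∈ rest, pvContains (acc ++ [(p1, v)]) q.1 = false := by
      intro v q hq
      rw [pvContains_append_single]
      have h1 : pvContains acc q.1 = false := hacc q (List.mem_cons_of_mem _ hq)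
      have h2 : (p1 == q.1) = false := by
        simp only [beq_eq_false_iff_ne, ne_eq]
        intro he; exact hx.1 (he ▸ (List.mem_map.2 ⟨q, hq, rfl⟩))
      rw [h1, h2]
      rfl
    rw [List.foldl_cons]
    by_cases hc : pvContains y p1 = true
    · simp only [hc, if_true]
      by_cases hz : max (p2 - pvGetD y p1) 0 = 0
      · have hb : (max (p2 - pvGetD y p1) 0 != 0) = false := by simp [hz]
        simp only [hb, Bool.false_eq_true, if_false]
        rw [ih acc hx.2 (fun q hq => hacc q (List.mem_cons_of_mem _ hq))]
        have hfp : pvF y (p1, p2) = none := by simp [pvF, hc, hz]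
        simp [hfp]
      · have hb : (max (p2 - pvGetD y p1) 0 != 0) = true := by simp [hz]
        simp only [hb, if_true]
        rw [hset, ih (acc ++ [(p1, max (p2 - pvGetD y p1) 0)]) hx.2 (hacc' _)]
        have hfp : pvF y (p1, p2) = some (p1, max (p2 - pvGetD y p1) 0) := by
          simp [pvF, hc, hz]
        simp [hfp]
    · simp only [Bool.not_eq_true] at hc
      simp only [hc, Bool.false_eq_true, if_false]
      rw [hset, ih (acc ++ [(p1, p2)]) hx.2 (hacc' _)]
      have hfp : pvF y (p1, p2) = some (p1, p2) := by simp [pvF, hc]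
      simp [hfp]

-- ===== VERDICT (by name: the statement is the Claim_ definition above) =====
theorem subdict_spec : Claim_equal_subdict := by
  intro x y _ hpre
  unfold Spec_subdict
  rw [subdict_eq_filterMap x y hpre.1 hpre.2]
  unfold subdict_alt
  rw [subdict_alt_eq_filterMap y x [] hpre.1 (by intro p _; rfl)]
  rfl
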